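-- pv_equiv track=rewrite | github.com/dcleung/interview-practice | Chapter-8-DP/longest-increasing-sub.py | naive_longest_sub
-- ===== SOURCE A (Python) =====
-- def naive_longest_sub(arr):
--     max_length = 1
--     for i in range(0, len(arr)):
--         curr = arr[i]
--         count = 1
--         for j in range(i + 1, len(arr)):
--             if arr[j] > curr:
--                 curr = arr[j]
--                 count += 1
--         if count > max_length:
--             max_length = count
--     return max_length
-- ===== SOURCE B (Python) =====
-- def naive_longest_sub(arr):
--     # Monotonic stack, right to left: after processing position i the stack holds
--     # exactly the greedy record chain starting at i, so its length is A's count(i).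
--     best = 1
--     stack = []
--     for x in reversed(arr):
--         while stack and stack[-1] <= x:
--             stack.pop()
--         stack.append(x)
--         if len(stack) > best:
--             best = len(stack)
--     return best
-- ===== Notes on version B (the rewrite author's own statement) =====
-- stated objective: faster
-- what changed: Replaced A's restart-the-greedy-scan-at-every-index nested loops by a single right-to-left pass with a monotonic stack whose length after processing position i equals A's greedy record count from i.
import Mathlib
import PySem

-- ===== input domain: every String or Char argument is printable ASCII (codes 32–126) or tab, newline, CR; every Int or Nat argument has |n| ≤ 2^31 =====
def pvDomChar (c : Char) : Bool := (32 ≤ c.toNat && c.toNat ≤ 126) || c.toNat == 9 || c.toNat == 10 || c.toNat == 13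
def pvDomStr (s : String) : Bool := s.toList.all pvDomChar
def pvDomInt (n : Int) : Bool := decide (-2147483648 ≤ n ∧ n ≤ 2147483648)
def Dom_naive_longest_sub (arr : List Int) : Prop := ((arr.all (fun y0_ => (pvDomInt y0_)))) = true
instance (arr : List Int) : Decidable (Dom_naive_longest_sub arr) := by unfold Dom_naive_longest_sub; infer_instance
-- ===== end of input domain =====

-- B replaces A's O(n^2) restart-at-every-index scan by one right-to-left pass with a
-- monotonic stack whose length after processing position i is A's greedy count from i.

-- ===== PORT A =====
def naive_longest_sub (arr : List Int) : Int :=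
  (PySem.List.pyRange 0 (arr.length : Int) 1).foldl
    (fun max_length i =>
      let curr : Int := PySem.List.pyGetD arr i 0
      let count : Int := 1
      let cc := (PySem.List.pyRange (i + 1) (arr.length : Int) 1).foldl
        (fun (s : Int × Int) j =>
          if PySem.List.pyGetD arr j 0 > s.1 then (PySem.List.pyGetD arr j 0, s.2 + 1) else s)
        (curr, count)
      if cc.2 > max_length then cc.2 else max_length)
    1

-- ===== PORT B =====
def naive_longest_sub_alt (arr : List Int) : Int :=
  (arr.reverse.foldl
    (fun (s : List Int × Int) x =>
      let st := x :: s.1.dropWhile (fun y => decide (y ≤ x))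
      (st, if (st.length : Int) > s.2 then (st.length : Int) else s.2))
    ([], 1)).2

-- ===== PRECONDITION & SPEC =====
def Spec_naive_longest_sub (arr : List Int) (out : Int) : Prop := out = naive_longest_sub_alt arr
instance (arr : List Int) (out : Int) : Decidable (Spec_naive_longest_sub arr out) := by unfold Spec_naive_longest_sub; infer_instance

-- ===== CLAIM (what is proved, stated in full; the proofs are below) =====
def Claim_equal_naive_longest_sub : Prop := ∀ (arr : List Int), Dom_naive_longest_sub arr → Spec_naive_longest_sub arr (naive_longest_sub arr)

-- ===== LEMMAS AND PROOFS =====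

-- greedy record chain of a suffix: head, then chain of the rest with values ≤ head dropped
def pvChain : List Int → List Int
  | [] => []
  | a :: t => a :: (pvChain t).dropWhile (fun y => decide (y ≤ a))

-- number of greedy records picked after starting value c
def pvGreedy (c : Int) : List Int → Int
  | [] => 0
  | x :: t => if c < x then 1 + pvGreedy x t else pvGreedy c t

-- max over suffixes of the chain length, seeded with 1 (B's accumulator shape)
def pvG : List Int → Int
  | [] => 1
  | a :: t =>
      if ((pvChain (a :: t)).length : Int) > pvG t then ((pvChain (a :: t)).length : Int) else pvG t

-- A's outer loop, rephrased on the structure of the list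
def pvH : List Int → Int → Int
  | [], m => m
  | a :: t, m => pvH t (if 1 + pvGreedy a t > m then 1 + pvGreedy a t else m)

lemma pvDropWhile_dropWhile (l : List Int) (x a : Int) (h : x ≤ a) :
    (l.dropWhile (fun y => decide (y ≤ x))).dropWhile (fun y => decide (y ≤ a))
      = l.dropWhile (fun y => decide (y ≤ a)) := by
  induction l with
  | nil => rfl
  | cons b t ih =>
      by_cases hb : b ≤ x
      · simp [hb, le_trans hb h, ih]
      · simp [List.dropWhile_cons, hb]

lemma pvGreedy_chain (t : List Int) : ∀ a : Int,
    pvGreedy a t = (((pvChain t).dropWhile (fun y => decide (y ≤ a))).length : Int) := by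
  induction t with
  | nil => intro a; rfl
  | cons x t ih =>
      intro a
      by_cases hx : a < x
      · simp [pvGreedy, pvChain, hx, not_le.mpr hx, ih x]; ring
      · have hxa : x ≤ a := not_lt.mp hx
        simp [pvGreedy, pvChain, hx, hxa,
          pvDropWhile_dropWhile (pvChain t) x a hxa, ih a]

lemma pvChain_len (a : Int) (t : List Int) :
    ((pvChain (a :: t)).length : Int) = 1 + pvGreedy a t := by
  simp [pvChain, pvGreedy_chain t a]; ring

lemma pvGreedy_nonneg (l : List Int) : ∀ c : Int, 0 ≤ pvGreedy c l := by
  induction l with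
  | nil => intro c; simp [pvGreedy]
  | cons x t ih =>
      intro c
      simp only [pvGreedy]
      split
      · have := ih x; omega
      · exact ih c

lemma pvG_ge_one (l : List Int) : 1 ≤ pvG l := by
  induction l with
  | nil => simp [pvG]
  | cons a t ih => simp only [pvG]; split <;> omega

-- A's inner loop computes pvGreedy
lemma pvInner_snd (l : List Int) : ∀ (c k : Int),
    (l.foldl (fun (s : Int × Int) x => if x > s.1 then (x, s.2 + 1) else s) (c, k)).2
      = k + pvGreedy c l := by
  induction l with
  | nil => intro c k; simp [pvGreedy]
  | cons x t ih =>
      intro c k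
      by_cases hx : c < x
      · simp [List.foldl_cons, hx, pvGreedy, ih x (k + 1)]; ring
      · simp [List.foldl_cons, hx, pvGreedy, ih c k]

-- A's outer loop over Nat indices computes pvH
lemma pvIdx (arr : List Int) : ∀ m : Int,
    (List.range arr.length).foldl
      (fun m k => if 1 + pvGreedy (arr.getD k 0) (arr.drop (k + 1)) > m
                  then 1 + pvGreedy (arr.getD k 0) (arr.drop (k + 1)) else m) m
    = pvH arr m := by
  induction arr with
  | nil => intro m; simp [pvH]
  | cons a t ih =>
      intro m
      rw [List.length_cons, List.range_succ_eq_map, List.foldl_cons, List.foldl_map]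
      simp only [List.getD_cons_zero, List.drop_succ_cons, List.drop_zero, Nat.succ_eq_add_one,
        List.getD_cons_succ]
      rw [pvH]
      exact ih _

-- A's port equals pvH arr 1
lemma pvA_eq_pvH (arr : List Int) : naive_longest_sub arr = pvH arr 1 := by
  unfold naive_longest_sub
  rw [PySem.List.pyRange_zero_natCast arr.length, List.foldl_map]
  rw [PySem.List.foldl_congr_mem _ _
      (fun m (k : Nat) => if 1 + pvGreedy (arr.getD k 0) (arr.drop (k + 1)) > m
                  then 1 + pvGreedy (arr.getD k 0) (arr.drop (k + 1)) else m) 1 ?_]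
  · exact pvIdx arr 1
  · intro acc k _
    simp only [PySem.List.pyGetD_natCast]
    have hcast : ((k : Int) + 1) = ((k + 1 : Nat) : Int) := by push_cast; ring
    rw [hcast,
      PySem.List.foldl_pyRange_pyGetD' arr 0
        (fun (s : Int × Int) x => if x > s.1 then (x, s.2 + 1) else s)
        (arr.getD k 0, 1) (by positivity),
      Int.toNat_natCast, pvInner_snd]

-- pvH in closed form
lemma pvH_eq (arr : List Int) : ∀ m : Int, 1 ≤ m →
    pvH arr m = if pvG arr > m then pvG arr else m := by
  induction arr with
  | nil => intro m hm; simp only [pvH, pvG]; split <;> omega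
  | cons a t ih =>
      intro m hm
      have hg0 : 0 ≤ pvGreedy a t := pvGreedy_nonneg t a
      have hg1 : 1 ≤ pvG t := pvG_ge_one t
      rw [pvH, ih _ (by split <;> omega)]
      simp only [pvG, pvChain_len]
      split_ifs <;> omega

-- B's foldr computes the chain and pvG
lemma pvB_eq (arr : List Int) :
    arr.foldr
      (fun x (s : List Int × Int) =>
        let st := x :: s.1.dropWhile (fun y => decide (y ≤ x))
        (st, if (st.length : Int) > s.2 then (st.length : Int) else s.2))
      ([], 1) = (pvChain arr, pvG arr) := by
  induction arr with
  | nil => rfl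
  | cons a t ih =>
      rw [List.foldr_cons, ih]
      simp only [pvG, pvChain]

-- ===== VERDICT (by name: the statement is the Claim_ definition above) =====
theorem naive_longest_sub_spec : Claim_equal_naive_longest_sub := by
  intro arr _
  unfold Spec_naive_longest_sub naive_longest_sub_alt
  rw [List.foldl_reverse, pvB_eq, pvA_eq_pvH, pvH_eq arr 1 le_rfl]
  have := pvG_ge_one arr
  split <;> omega
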